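-- pv_equiv track=rewrite | github.com/AWhetter/pathseq | src/pathseq/_ast/_formatter.py | _splice_strings_onto_ranges
-- ===== SOURCE A (Python) =====
-- from collections.abc import Iterable
--
-- def _splice_strings_onto_ranges(
--     strings: Iterable[str], inter_ranges: Iterable[str]
-- ) -> str:
--     """Format the given range strings and inter-range strings together.
--
--     Raises:
--         TypeError: If the given number of strings does not match
--             the number of inter-range strings minus one.
--     """
--     result = ""
--
--     strs = iter(strings)
--     for inter_range in inter_ranges:
--         try:
--             result += next(strs)
--         except StopIteration:
--             break
--
--         result += inter_range
--     else:
--         try: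
--             result += next(strs)
--         except StopIteration:
--             pass
--         else:
--             try:
--                 next(strs)
--             except StopIteration:
--                 return result
--
--     raise TypeError(
--         "The number of inter-range strings given does not match"
--         " the number of range strings given minus one."
--     )
-- ===== SOURCE B (Python) =====
-- def _splice_strings_onto_ranges(strings, inter_ranges):
--     """Format the given range strings and inter-range strings together."""
--     strings = list(strings)
--     inter_ranges = list(inter_ranges)
--     if len(strings) != len(inter_ranges) + 1:
--         raise TypeError(
--             "The number of inter-range strings given does not match"
--             " the number of range strings given minus one."
--         )
--     parts = []
--     for string, inter_range in zip(strings, inter_ranges):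
--         parts.append(string)
--         parts.append(inter_range)
--     parts.append(strings[-1])
--     return "".join(parts)
-- ===== Notes on version B (the rewrite author's own statement) =====
-- stated objective: simpler
-- what changed: Replaces the lazy single-pass interleave with iterator next()/StopIteration handling and for/else+break by a validate-then-build decomposition: materialize both inputs, check lengths up front, then join the zipped interleaving.
import Mathlib
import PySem

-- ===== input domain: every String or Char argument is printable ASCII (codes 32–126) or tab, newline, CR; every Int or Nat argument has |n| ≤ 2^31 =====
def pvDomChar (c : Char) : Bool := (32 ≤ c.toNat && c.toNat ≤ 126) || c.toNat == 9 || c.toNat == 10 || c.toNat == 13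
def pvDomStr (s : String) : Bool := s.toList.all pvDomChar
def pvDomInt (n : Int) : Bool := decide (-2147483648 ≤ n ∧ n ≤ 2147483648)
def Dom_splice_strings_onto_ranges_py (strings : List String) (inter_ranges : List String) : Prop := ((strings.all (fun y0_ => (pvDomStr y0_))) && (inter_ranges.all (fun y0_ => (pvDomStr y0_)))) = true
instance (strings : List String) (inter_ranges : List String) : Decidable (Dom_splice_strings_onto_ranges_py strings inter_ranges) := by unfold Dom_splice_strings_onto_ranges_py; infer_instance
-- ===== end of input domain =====

-- B replaces A's lazy iterator interleave (for/else + break + StopIteration handling)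
-- by a validate-then-build decomposition: check the lengths up front, then join the
-- zipped interleaving. Objective: simpler. Pre_ excludes the inputs where A raises
-- TypeError (length mismatch); B raises the same TypeError there.


-- ===== PORT A =====
-- A's loop over inter_ranges, carrying the remaining iterator contents `strs` and the
-- accumulated `result`; `none` marks the paths where A falls through to `raise TypeError`.
def spliceGoA : List String → List String → String → Option String
  | strs, [], res =>
    -- for/else branch: result += next(strs) (StopIteration → pass → raise);
    -- then next(strs) must raise StopIteration to return.
    match strs with
    | [] => none
    | s :: [] => some (res ++ s)
    | _ :: _ :: _ => none
  | strs, ir :: irs, res =>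
    match strs with
    | [] => none                       -- next(strs) raised: break → raise TypeError
    | s :: rest => spliceGoA rest irs (res ++ s ++ ir)

def splice_strings_onto_ranges_py (strings : List String) (inter_ranges : List String) : String :=
  (spliceGoA strings inter_ranges "").getD ""   -- `none` = TypeError, excluded by Pre_

-- ===== PORT B =====
def splice_strings_onto_ranges_py_alt (strings : List String) (inter_ranges : List String) : String :=
  if strings.length = inter_ranges.length + 1 then
    let parts := (strings.zip inter_ranges).foldl (fun acc p => acc ++ [p.1, p.2]) []
    let parts := parts ++ [(PySem.List.pyGet? strings (-1)).getD ""]  -- strings[-1]; in-range here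
    parts.foldl (fun acc s => acc ++ s) ""   -- "".join(parts): exact, concatenation with empty separator
  else ""                                    -- raise TypeError, excluded by Pre_

-- ===== PRECONDITION & SPEC =====
-- Pre_ excludes exactly the inputs on which A (and B) raise TypeError: a length mismatch.
def Pre_splice_strings_onto_ranges_py (strings : List String) (inter_ranges : List String) : Prop :=
  strings.length = inter_ranges.length + 1
instance (strings : List String) (inter_ranges : List String) : Decidable (Pre_splice_strings_onto_ranges_py strings inter_ranges) := by unfold Pre_splice_strings_onto_ranges_py; infer_instance

def pvWitness_splice_strings_onto_ranges_py : List String × List String := (["1-3", "7-9"], [", "])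

def Spec_splice_strings_onto_ranges_py (strings : List String) (inter_ranges : List String) (out : String) : Prop := out = splice_strings_onto_ranges_py_alt strings inter_ranges
instance (strings : List String) (inter_ranges : List String) (out : String) : Decidable (Spec_splice_strings_onto_ranges_py strings inter_ranges out) := by unfold Spec_splice_strings_onto_ranges_py; infer_instance

-- ===== CLAIM (what is proved, stated in full; the proofs are below) =====
def Claim_equal_splice_strings_onto_ranges_py : Prop := ∀ (strings : List String) (inter_ranges : List String), Dom_splice_strings_onto_ranges_py strings inter_ranges → Pre_splice_strings_onto_ranges_py strings inter_ranges → Spec_splice_strings_onto_ranges_py strings inter_ranges (splice_strings_onto_ranges_py strings inter_ranges)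

-- ===== LEMMAS AND PROOFS =====

-- The common reference value: the interleaving, written as direct structural recursion.
def spliceFlat : List String → List String → String
  | [s], [] => s
  | s :: rest, ir :: irs => s ++ ir ++ spliceFlat rest irs
  | _, _ => ""

lemma spliceGoA_eq_flat : ∀ (irs strs : List String) (res : String),
    strs.length = irs.length + 1 →
    spliceGoA strs irs res = some (res ++ spliceFlat strs irs) := by
  intro irs
  induction irs with
  | nil =>
      intro strs res h
      match strs, h with
      | [s], _ => simp [spliceGoA, spliceFlat]
  | cons ir irs ih =>
      intro strs res h
      match strs, h with
      | s :: rest, h =>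
        simp only [List.length_cons, Nat.add_right_cancel_iff] at h
        rw [show spliceGoA (s :: rest) (ir :: irs) res
              = spliceGoA rest irs (res ++ s ++ ir) from rfl,
            ih rest (res ++ s ++ ir) h]
        simp [spliceFlat, String.append_assoc]

lemma foldl_append_str : ∀ (parts : List String) (acc : String),
    parts.foldl (fun a s => a ++ s) acc = acc ++ parts.foldl (fun a s => a ++ s) "" := by
  intro parts
  induction parts with
  | nil => intro acc; simp [List.foldl]
  | cons p ps ih =>
      intro acc
      simp only [List.foldl]
      rw [ih (acc ++ p), ih ("" ++ p), String.append_assoc]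
      simp

lemma pyGet_neg1_cons₂ (s r : String) (l : List String) :
    PySem.List.pyGet? (s :: r :: l) (-1) = PySem.List.pyGet? (r :: l) (-1) := by
  have h1 : PySem.List.pyIdx? (l.length + 1 + 1) (-1) = some (l.length + 1) := by
    simp [PySem.List.pyIdx?]
  have h2 : PySem.List.pyIdx? (l.length + 1) (-1) = some l.length := by
    simp [PySem.List.pyIdx?]
  simp only [PySem.List.pyGet?, List.length_cons]
  rw [h1, h2]
  simp only [Option.bind_some, List.getElem?_cons_succ]

lemma alt_eq_flat : ∀ (irs strs : List String),
    strs.length = irs.length + 1 →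
    splice_strings_onto_ranges_py_alt strs irs = spliceFlat strs irs := by
  intro irs
  induction irs with
  | nil =>
      intro strs h
      match strs, h with
      | [s], _ =>
        simp [splice_strings_onto_ranges_py_alt, PySem.List.pyGet?, PySem.List.pyIdx?,
              spliceFlat, List.foldl]
  | cons ir irs ih =>
      intro strs h
      match strs, h with
      | s :: r :: rest', h =>
        have h' : (r :: rest').length = irs.length + 1 := by simpa using h
        have hrest := ih (r :: rest') h'
        rw [splice_strings_onto_ranges_py_alt, if_pos h'] at hrest
        rw [splice_strings_onto_ranges_py_alt,
            if_pos (show (s :: r :: rest').length = (ir :: irs).length + 1 by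
              simp at h' ⊢; omega)]
        simp only [List.zip_cons_cons, List.foldl_cons, List.nil_append] at hrest ⊢
        rw [PySem.List.foldl_append_eq_flatMap] at hrest ⊢
        simp only [List.nil_append, List.cons_append] at hrest ⊢
        rw [pyGet_neg1_cons₂, List.foldl_cons, List.foldl_cons, foldl_append_str, hrest]
        simp [spliceFlat, String.append_assoc]

-- ===== VERDICT (by name: the statement is the Claim_ definition above) =====
theorem splice_strings_onto_ranges_py_spec : Claim_equal_splice_strings_onto_ranges_py := by
  intro strings inter_ranges _ hpre
  unfold Spec_splice_strings_onto_ranges_py splice_strings_onto_ranges_py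
  rw [spliceGoA_eq_flat inter_ranges strings "" hpre, alt_eq_flat inter_ranges strings hpre]
  simp
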